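-- pv_equiv track=rewrite | github.com/dummassdenzel/Klair-AI | ai/services/document_processor/extraction/chunker.py | _find_chunk_boundary
-- ===== SOURCE A (Python) =====
-- def _find_chunk_boundary(text: str, start: int, end: int) -> int:
--     """
--     Find the best split point at or before *end* within the window [start, end].
--
--     Boundary priority (highest → lowest):
--       1. Sentence ending (period, !, ?) — with false-positive guards
--       2. Paragraph break (blank line)
--       3. Any whitespace
--
--     Lookback distances are proportional to the window span so the method
--     works correctly regardless of the character window size passed in.
--
--     False-positive guards for periods
--     ----------------------------------
--     A plain `.' followed by whitespace fires incorrectly on: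
--       - abbreviations : e.g., i.e., Mr., Dr., U.S.A.
--       - decimal numbers: 3.14, 99.9 %   (these have *no* space after `.`,
--                           so the existing whitespace check already skips them)
--       - file paths / URLs: example.com/page  (no space after `.`)
--
--     The remaining ambiguous case is abbreviations like "Mr. Smith" where
--     a space *does* follow the period.  The fix: require that the first
--     non-whitespace character after the `.` is uppercase.  A true new
--     sentence always begins with an uppercase letter (or a digit/symbol for
--     numbered items, which is handled by the paragraph-break tier anyway).
--     `!` and `?` are unambiguous sentence terminators — no extra check needed.
--     """
--     span = end - start
--
--     # ── tier 1: sentence endings ──────────────────────────────────────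
--     lookback = max(1, span // 10)
--     for i in range(end - 1, max(end - lookback, start), -1):
--         ch = text[i]
--         if ch in "!?" and i + 1 < len(text) and text[i + 1].isspace():
--             return i + 1
--         if ch == ".":
--             # Scan past any whitespace to find the first non-space char
--             j = i + 1
--             while j < len(text) and text[j] == " ":
--                 j += 1
--             # Split only if: end of text, or next real char is uppercase
--             if j >= len(text) or text[j].isupper():
--                 return i + 1
--
--     # ── tier 2: paragraph break (blank line) ──────────────────────────
--     lookback = max(1, span // 5)
--     for i in range(end - 1, max(end - lookback, start), -1):
--         if text[i] == "\n" and (i + 1 >= len(text) or text[i + 1] == "\n"):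
--             return i + 1
--
--     # ── tier 3: any whitespace ────────────────────────────────────────
--     lookback = max(1, span // 20)
--     for i in range(end - 1, max(end - lookback, start), -1):
--         if text[i].isspace():
--             return i + 1
--
--     return end
-- ===== SOURCE B (Python) =====
-- def _is_sentence_end(text: str, i: int) -> bool:
--     ch = text[i]
--     if ch in "!?" and i + 1 < len(text) and text[i + 1].isspace():
--         return True
--     if ch == ".":
--         j = i + 1
--         while j < len(text) and text[j] == " ":
--             j += 1
--         return j >= len(text) or text[j].isupper()
--     return False
--
--
-- def _is_para_break(text: str, i: int) -> bool:
--     return text[i] == "\n" and (i + 1 >= len(text) or text[i + 1] == "\n")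
--
--
-- def _find_chunk_boundary(text: str, start: int, end: int) -> int:
--     span = end - start
--     m1 = max(end - max(1, span // 10), start)   # exclusive lower bound, sentence tier
--     m2 = max(end - max(1, span // 5), start)    # exclusive lower bound, paragraph tier (widest)
--     m3 = max(end - max(1, span // 20), start)   # exclusive lower bound, whitespace tier
--     best1 = best2 = best3 = None
--     # one forward scan over the real positions of the widest window
--     for i in range(max(m2 + 1, 0), min(end, len(text))):
--         if i > m1 and _is_sentence_end(text, i):
--             best1 = i
--         if _is_para_break(text, i):
--             best2 = i
--         if i > m3 and text[i].isspace():
--             best3 = i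
--     for best in (best1, best2, best3):
--         if best is not None:
--             return best + 1
--     return end
-- ===== Notes on version B (the rewrite author's own statement) =====
-- stated objective: alternative
-- what changed: Replaces A's three sequential backward scans (return on first match) by a single forward pass over the in-text positions of the widest lookback window that tracks the last matching index per tier, then returns the highest-priority candidate; backward-first equals forward-last.
-- outside the precondition, e.g. on _find_chunk_boundary('ab\n\ncd', -29, 1): A returns -3, B returns 1; on _find_chunk_boundary('abc', 0, 50): A raises IndexError, B returns 50
import Mathlib
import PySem

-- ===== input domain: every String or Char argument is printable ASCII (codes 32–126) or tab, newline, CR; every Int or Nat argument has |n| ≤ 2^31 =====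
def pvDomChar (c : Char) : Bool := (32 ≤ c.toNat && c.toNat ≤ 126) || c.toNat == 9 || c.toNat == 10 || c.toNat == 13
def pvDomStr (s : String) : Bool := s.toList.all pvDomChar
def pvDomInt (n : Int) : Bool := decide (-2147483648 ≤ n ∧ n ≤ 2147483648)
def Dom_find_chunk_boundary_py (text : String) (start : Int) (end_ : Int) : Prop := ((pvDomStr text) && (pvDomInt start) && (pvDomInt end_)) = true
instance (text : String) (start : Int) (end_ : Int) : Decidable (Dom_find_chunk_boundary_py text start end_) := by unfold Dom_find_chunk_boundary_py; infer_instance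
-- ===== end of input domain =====

-- B replaces A's three backward first-match scans by one forward scan over the real (in-text) positions of the widest window, keeping the last match per tier; same return value, similar cost.


-- Shared condition helpers: both Pythons test the identical character conditions; A inline, B via tiny helpers.
-- 'while j < len(text) and text[j] == " ": j += 1'  (the '.'-tier space skip, identical in both sources)
def pvSkip (cs : List Char) (j : Int) : Int :=
  if h : j < (cs.length : Int) ∧ PySem.List.pyGetD cs j (Char.ofNat 0) = ' ' then pvSkip cs (j + 1) else j
termination_by ((cs.length : Int) - j).toNat
decreasing_by omega

-- tier-1 condition: 'ch in "!?" and i+1 < len and text[i+1].isspace()' or the guarded '.' check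
def pvP1 (cs : List Char) (i : Int) : Bool :=
  let ch := PySem.List.pyGetD cs i (Char.ofNat 0)
  ((ch == '!' || ch == '?') && decide (i + 1 < (cs.length : Int)) &&
      PySem.Chars.isspace (PySem.List.pyGetD cs (i + 1) (Char.ofNat 0)))
  || (ch == '.' &&
      (let j := pvSkip cs (i + 1)
       decide ((cs.length : Int) ≤ j) || PySem.Chars.isupper (PySem.List.pyGetD cs j (Char.ofNat 0))))

-- tier-2 condition: 'text[i] == "\n" and (i+1 >= len or text[i+1] == "\n")'
def pvP2 (cs : List Char) (i : Int) : Bool :=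
  PySem.List.pyGetD cs i (Char.ofNat 0) == '\n' &&
    (decide ((cs.length : Int) ≤ i + 1) || PySem.List.pyGetD cs (i + 1) (Char.ofNat 0) == '\n')

-- tier-3 condition: 'text[i].isspace()'
def pvP3 (cs : List Char) (i : Int) : Bool :=
  PySem.Chars.isspace (PySem.List.pyGetD cs i (Char.ofNat 0))

-- ===== PORT A =====
-- Each 'for i in range(end-1, max(end-lookback, start), -1): if <cond>: return i+1' is find? over the countdown range.
def find_chunk_boundary_py (text : String) (start : Int) (end_ : Int) : Int :=
  match (PySem.List.pyRange (end_ - 1) (max (end_ - max 1 (PySem.Int.floordiv (end_ - start) 10)) start) (-1)).find? (pvP1 text.toList) with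
  | some i => i + 1
  | none =>
    match (PySem.List.pyRange (end_ - 1) (max (end_ - max 1 (PySem.Int.floordiv (end_ - start) 5)) start) (-1)).find? (pvP2 text.toList) with
    | some i => i + 1
    | none =>
      match (PySem.List.pyRange (end_ - 1) (max (end_ - max 1 (PySem.Int.floordiv (end_ - start) 20)) start) (-1)).find? (pvP3 text.toList) with
      | some i => i + 1
      | none => end_

-- ===== PORT B =====
-- Source B's single forward loop body: update the three per-tier 'last match' candidates.
def pvStep (cs : List Char) (m1 m3 : Int) (st : Option Int × Option Int × Option Int) (i : Int) :
    Option Int × Option Int × Option Int :=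
  (if decide (m1 < i) && pvP1 cs i then some i else st.1,
   if pvP2 cs i then some i else st.2.1,
   if decide (m3 < i) && pvP3 cs i then some i else st.2.2)

-- 'for i in range(max(m2 + 1, 0), min(end, len(text)))' then the priority cascade over the candidates.
def find_chunk_boundary_py_alt (text : String) (start : Int) (end_ : Int) : Int :=
  match ((PySem.List.pyRange (max (max (end_ - max 1 (PySem.Int.floordiv (end_ - start) 5)) start + 1) 0) (min end_ (PySem.Str.len text)) 1).foldl
      (pvStep text.toList (max (end_ - max 1 (PySem.Int.floordiv (end_ - start) 10)) start)
        (max (end_ - max 1 (PySem.Int.floordiv (end_ - start) 20)) start)) (none, none, none)).1 with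
  | some i => i + 1
  | none =>
    match ((PySem.List.pyRange (max (max (end_ - max 1 (PySem.Int.floordiv (end_ - start) 5)) start + 1) 0) (min end_ (PySem.Str.len text)) 1).foldl
        (pvStep text.toList (max (end_ - max 1 (PySem.Int.floordiv (end_ - start) 10)) start)
          (max (end_ - max 1 (PySem.Int.floordiv (end_ - start) 20)) start)) (none, none, none)).2.1 with
    | some i => i + 1
    | none =>
      match ((PySem.List.pyRange (max (max (end_ - max 1 (PySem.Int.floordiv (end_ - start) 5)) start + 1) 0) (min end_ (PySem.Str.len text)) 1).foldl
          (pvStep text.toList (max (end_ - max 1 (PySem.Int.floordiv (end_ - start) 10)) start)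
            (max (end_ - max 1 (PySem.Int.floordiv (end_ - start) 20)) start)) (none, none, none)).2.2 with
      | some i => i + 1
      | none => end_

-- ===== PRECONDITION & SPEC =====
-- Pre_ restricts to the chunker's natural domain: either the window is so small (span ≤ 9) that every lookback
-- loop is empty and A returns end untouched, or the window's scanned region lies at nonnegative in-text positions
-- (end ≤ len and the widest exclusive lower bound m2 ≥ -1); outside it A's scan walks negative indices, where its
-- value comes from Python's negative-index wraparound or an IndexError once the scan passes -len — a corner no
-- caller of a chunker specifies, which B (scanning only real positions) does not reproduce.
def Pre_find_chunk_boundary_py (text : String) (start : Int) (end_ : Int) : Prop :=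
  end_ - start ≤ 9 ∨
    (end_ ≤ PySem.Str.len text ∧ -1 ≤ max (end_ - max 1 (PySem.Int.floordiv (end_ - start) 5)) start)
instance (text : String) (start : Int) (end_ : Int) : Decidable (Pre_find_chunk_boundary_py text start end_) := by
  unfold Pre_find_chunk_boundary_py; infer_instance
def pvWitness_find_chunk_boundary_py : String × Int × Int := ("Hi there. A big test", 0, 20)

def Spec_find_chunk_boundary_py (text : String) (start : Int) (end_ : Int) (out : Int) : Prop := out = find_chunk_boundary_py_alt text start end_
instance (text : String) (start : Int) (end_ : Int) (out : Int) : Decidable (Spec_find_chunk_boundary_py text start end_ out) := by unfold Spec_find_chunk_boundary_py; infer_instance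

-- ===== CLAIM (what is proved, stated in full; the proofs are below) =====
def Claim_equal_find_chunk_boundary_py : Prop := ∀ (text : String) (start : Int) (end_ : Int), Dom_find_chunk_boundary_py text start end_ → Pre_find_chunk_boundary_py text start end_ → Spec_find_chunk_boundary_py text start end_ (find_chunk_boundary_py text start end_)

-- ===== LEMMAS AND PROOFS =====

-- B's triple fold splits into three independent folds.
theorem pvFoldTriple (cs : List Char) (m1 m3 : Int) :
    ∀ (l : List Int) (a b c : Option Int),
      l.foldl (pvStep cs m1 m3) (a, b, c) =
        (l.foldl (fun s i => if decide (m1 < i) && pvP1 cs i then some i else s) a,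
         l.foldl (fun s i => if pvP2 cs i then some i else s) b,
         l.foldl (fun s i => if decide (m3 < i) && pvP3 cs i then some i else s) c) := by
  intro l
  induction l with
  | nil => intro a b c; rfl
  | cons x l ih => intro a b c; simp only [List.foldl_cons, pvStep]; exact ih _ _ _

-- 'keep the last match' fold = first match of the reversed list (with the initial value as fallback).
theorem pvFoldl_lastMatch (p : Int → Bool) :
    ∀ (l : List Int) (a : Option Int),
      l.foldl (fun s i => if p i then some i else s) a = (l.reverse.find? p).or a := by
  intro l
  induction l with
  | nil => intro a; simp
  | cons x l ih =>
    intro a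
    simp only [List.foldl_cons, List.reverse_cons, List.find?_append, ih]
    rcases h : l.reverse.find? p with _ | v <;> by_cases hp : p x <;> simp [List.find?, hp]

theorem pvFind?_congr (p q : Int → Bool) :
    ∀ (l : List Int), (∀ x ∈ l, p x = q x) → l.find? p = l.find? q := by
  intro l
  induction l with
  | nil => intro _; rfl
  | cons x l ih =>
    intro h
    simp only [List.find?]
    rw [h x (by simp), ih fun y hy => h y (by simp [hy])]

-- a guarded last match over the wide window = A's first match over that tier's own countdown window
theorem pvGuardFind (p : Int → Bool) (m1 m2 e : Int) (h : m2 ≤ m1) :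
    ((PySem.List.pyRange (m2 + 1) e 1).reverse.find? (fun i => decide (m1 < i) && p i)) =
      (PySem.List.pyRange (e - 1) m1 (-1)).find? p := by
  by_cases he : e ≤ m1
  · rw [PySem.List.pyRange_neg_one_eq_nil (by omega), List.find?_eq_none.2, List.find?_nil]
    intro x hx
    have hx' := PySem.List.mem_pyRange_one.1 (List.mem_reverse.1 hx)
    simp only [Bool.and_eq_true, decide_eq_true_eq, not_and]
    intro hgt; omega
  · rw [PySem.List.pyRange_one_append (m2 + 1) (m1 + 1) e (by omega) (by omega),
      List.reverse_append, List.find?_append]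
    have h2 : (PySem.List.pyRange (m1 + 1) e 1).reverse.find? (fun i => decide (m1 < i) && p i) =
        (PySem.List.pyRange (m1 + 1) e 1).reverse.find? p := by
      apply pvFind?_congr
      intro x hx
      have hx' := PySem.List.mem_pyRange_one.1 (List.mem_reverse.1 hx)
      simp [show m1 < x by omega]
    have h3 : (PySem.List.pyRange (m2 + 1) (m1 + 1) 1).reverse.find? (fun i => decide (m1 < i) && p i) = none := by
      apply List.find?_eq_none.2
      intro x hx
      have hx' := PySem.List.mem_pyRange_one.1 (List.mem_reverse.1 hx)
      simp only [Bool.and_eq_true, decide_eq_true_eq, not_and]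
      intro hgt; omega
    rw [h2, h3, Option.or_none]
    have : PySem.List.pyRange (e - 1) m1 (-1) = (PySem.List.pyRange (m1 + 1) e 1).reverse := by
      have := PySem.List.pyRange_neg_one_eq_reverse (e - 1) m1
      simpa using this
    rw [this]

-- the three exclusive lower bounds are ordered: m2 ≤ m1 and m2 ≤ m3 (tier 2 has the widest lookback)
theorem pvBounds (s e st : Int) :
    max (e - max 1 (PySem.Int.floordiv s 5)) st ≤ max (e - max 1 (PySem.Int.floordiv s 10)) st ∧
    max (e - max 1 (PySem.Int.floordiv s 5)) st ≤ max (e - max 1 (PySem.Int.floordiv s 20)) st := by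
  have h5 := PySem.Int.floordiv_mul_add_mod s 5
  have h5a := PySem.Int.mod_nonneg s (b := 5) (by norm_num)
  have h5b := PySem.Int.mod_lt s (b := 5) (by norm_num)
  have h10 := PySem.Int.floordiv_mul_add_mod s 10
  have h10a := PySem.Int.mod_nonneg s (b := 10) (by norm_num)
  have h10b := PySem.Int.mod_lt s (b := 10) (by norm_num)
  have h20 := PySem.Int.floordiv_mul_add_mod s 20
  have h20a := PySem.Int.mod_nonneg s (b := 20) (by norm_num)
  have h20b := PySem.Int.mod_lt s (b := 20) (by norm_num)
  omega

-- when the span is at most 9, every lookback collapses to 1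
theorem pvSmall (s : Int) (h : s ≤ 9) :
    PySem.Int.floordiv s 5 ≤ 1 ∧ PySem.Int.floordiv s 10 ≤ 1 ∧ PySem.Int.floordiv s 20 ≤ 1 := by
  have h5 := PySem.Int.floordiv_mul_add_mod s 5
  have h5a := PySem.Int.mod_nonneg s (b := 5) (by norm_num)
  have h5b := PySem.Int.mod_lt s (b := 5) (by norm_num)
  have h10 := PySem.Int.floordiv_mul_add_mod s 10
  have h10a := PySem.Int.mod_nonneg s (b := 10) (by norm_num)
  have h10b := PySem.Int.mod_lt s (b := 10) (by norm_num)
  have h20 := PySem.Int.floordiv_mul_add_mod s 20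
  have h20a := PySem.Int.mod_nonneg s (b := 20) (by norm_num)
  have h20b := PySem.Int.mod_lt s (b := 20) (by norm_num)
  omega

-- ===== VERDICT (by name: the statement is the Claim_ definition above) =====
theorem find_chunk_boundary_py_spec : Claim_equal_find_chunk_boundary_py := by
  intro text start end_ _ hpre
  unfold Spec_find_chunk_boundary_py find_chunk_boundary_py find_chunk_boundary_py_alt
  have hb := pvBounds (end_ - start) end_ start
  rw [pvFoldTriple, pvFoldl_lastMatch, pvFoldl_lastMatch, pvFoldl_lastMatch]
  simp only [Option.or_none]
  rcases hpre with hsmall | ⟨hlen, hm2⟩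
  · -- span ≤ 9: every lookback is 1, every range is empty on both sides
    obtain ⟨c5, c10, c20⟩ := pvSmall (end_ - start) hsmall
    rw [PySem.List.pyRange_neg_one_eq_nil (by omega), PySem.List.pyRange_neg_one_eq_nil (by omega),
      PySem.List.pyRange_neg_one_eq_nil (by omega), PySem.List.pyRange_one_eq_nil (by omega)]
    simp
  · -- natural window: the clamps are no-ops, then forward-last = backward-first per tier
    rw [show max (max (end_ - max 1 (PySem.Int.floordiv (end_ - start) 5)) start + 1) 0
          = max (end_ - max 1 (PySem.Int.floordiv (end_ - start) 5)) start + 1 by omega,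
        show min end_ (PySem.Str.len text) = end_ by omega]
    rw [pvGuardFind (pvP1 text.toList) _ _ _ hb.1, pvGuardFind (pvP3 text.toList) _ _ _ hb.2]
    have h2 : (PySem.List.pyRange (max (end_ - max 1 (PySem.Int.floordiv (end_ - start) 5)) start + 1) end_ 1).reverse =
        PySem.List.pyRange (end_ - 1) (max (end_ - max 1 (PySem.Int.floordiv (end_ - start) 5)) start) (-1) := by
      have := PySem.List.pyRange_neg_one_eq_reverse (end_ - 1) (max (end_ - max 1 (PySem.Int.floordiv (end_ - start) 5)) start)
      simpa using this.symm
    rw [h2]
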